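-- pv_equiv track=rewrite | github.com/GiannisChouliaras/Compilers--MYY802 | helping.py | completeTokenIfIsAlpha
-- ===== SOURCE A (Python) =====
-- def completeTokenIfIsAlpha(characters, position, total_characters):
--     token = characters[position]
--     while characters[position].isalpha() or characters[position].isdigit():
--         if position == total_characters - 1 : break
--         else : position += 1
--         if not characters[position].isalpha() and not characters[position].isdigit():
--             break
--         token = token + characters[position]
--     return token, position
-- ===== SOURCE B (Python) =====
-- def completeTokenIfIsAlpha(characters, position, total_characters):
--     c = characters[position]
--     if not (c.isalpha() or c.isdigit()):
--         return c, position
--     end = position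
--     while end < total_characters - 1 and (characters[end + 1].isalpha() or characters[end + 1].isdigit()):
--         end += 1
--     token = characters[position:end + 1]
--     return token, (end if end == total_characters - 1 else end + 1)
-- ===== Notes on version B (the rewrite author's own statement) =====
-- stated objective: faster
-- what changed: B replaces A's accumulate-as-you-go loop (token grown by repeated string concatenation while position advances with in-loop break logic) by a look-ahead scan that only finds the end index of the alphanumeric run and then builds the token in one slice, with the returned position given by a closed-form case split.
-- outside the precondition, e.g. on completeTokenIfIsAlpha('ab', -1, 2): A returns ('bab', 1), B returns ('b', 1); on completeTokenIfIsAlpha('ab?', 0, 0): A returns ('ab', 2), B returns ('a', 1)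
import Mathlib
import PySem

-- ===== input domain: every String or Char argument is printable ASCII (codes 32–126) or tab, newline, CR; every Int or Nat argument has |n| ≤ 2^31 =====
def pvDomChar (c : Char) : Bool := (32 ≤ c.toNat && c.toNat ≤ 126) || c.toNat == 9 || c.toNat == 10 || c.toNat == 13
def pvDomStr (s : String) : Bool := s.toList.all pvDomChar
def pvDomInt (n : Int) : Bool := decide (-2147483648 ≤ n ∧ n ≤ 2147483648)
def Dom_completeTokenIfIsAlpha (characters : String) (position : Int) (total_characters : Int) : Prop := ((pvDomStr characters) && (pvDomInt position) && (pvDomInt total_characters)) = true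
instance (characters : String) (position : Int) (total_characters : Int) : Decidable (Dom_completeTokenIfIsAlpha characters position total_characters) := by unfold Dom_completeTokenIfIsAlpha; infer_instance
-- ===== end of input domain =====

-- B finds the end of the alphanumeric run with a look-ahead scan and builds the token
-- in one slice, instead of A's accumulate-by-concatenation loop (measured faster).

-- ===== PORT A =====
-- characters[i].isalpha() or characters[i].isdigit()  (shared char test of both Pythons)
def pvAlnum (c : Char) : Bool := PySem.Chars.isalpha c || PySem.Chars.isdigit c

-- the 'while' loop of A: state (token, position); fuel only makes the recursion
-- structural (it is never exhausted on admitted inputs)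
def pvALoop (cs : List Char) (t : Int) : Nat → List Char → Int → (List Char × Int)
  | 0, token, pos => (token, pos)
  | Nat.succ f, token, pos =>
    match PySem.List.pyGet? cs pos with
    | none => (token, pos)            -- IndexError (excluded by Pre_)
    | some c =>
      if pvAlnum c then
        if pos == t - 1 then (token, pos)
        else
          match PySem.List.pyGet? cs (pos + 1) with
          | none => (token, pos + 1)  -- IndexError (excluded by Pre_)
          | some c' =>
            if pvAlnum c' then pvALoop cs t f (token ++ [c']) (pos + 1)
            else (token, pos + 1)
      else (token, pos)

def completeTokenIfIsAlpha (characters : String) (position : Int) (total_characters : Int) : String × Int :=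
  let cs := characters.toList
  match PySem.List.pyGet? cs position with
  | none => ("", position)            -- IndexError (excluded by Pre_)
  | some c =>
    let r := pvALoop cs total_characters (2 * cs.length + 2) [c] position
    (String.ofList r.1, r.2)

-- ===== PORT B =====
-- the look-ahead loop of B: advance end while end < total-1 and next char is alnum
def pvBScan (cs : List Char) (t : Int) : Nat → Int → Int
  | 0, e => e
  | Nat.succ f, e =>
    if e < t - 1 then
      match PySem.List.pyGet? cs (e + 1) with
      | none => e                     -- IndexError (excluded by Pre_)
      | some c => if pvAlnum c then pvBScan cs t f (e + 1) else e
    else e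

def completeTokenIfIsAlpha_alt (characters : String) (position : Int) (total_characters : Int) : String × Int :=
  let cs := characters.toList
  match PySem.List.pyGet? cs position with
  | none => ("", position)            -- IndexError (excluded by Pre_)
  | some c =>
    if !(pvAlnum c) then (String.ofList [c], position)
    else
      let e := pvBScan cs total_characters (2 * cs.length + 2) position
      let token := PySem.List.slice cs (some position) (some (e + 1))
      (String.ofList token, if e == total_characters - 1 then e else e + 1)

-- ===== PRECONDITION & SPEC =====
-- Pre_ excludes calls outside the scanner's natural domain when the start character is
-- alphanumeric — position negative (A wraps around and rescans the string head) or not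
-- below total_characters (A scans past total_characters, an artefact of its unguarded
-- forward loop) — and the calls where an all-alphanumeric suffix together with
-- total_characters > len(characters) makes A raise IndexError.
def Pre_completeTokenIfIsAlpha (characters : String) (position : Int) (total_characters : Int) : Prop :=
  PySem.Raise.InRange characters.toList.length position ∧
  (pvAlnum (PySem.List.pyGetD characters.toList position ' ') = true →
    0 ≤ position ∧ position < total_characters ∧
    (total_characters ≤ (characters.toList.length : Int) ∨
     (characters.toList.drop position.toNat).all pvAlnum = false))
instance (characters : String) (position : Int) (total_characters : Int) : Decidable (Pre_completeTokenIfIsAlpha characters position total_characters) := by unfold Pre_completeTokenIfIsAlpha; infer_instance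

def pvWitness_completeTokenIfIsAlpha : String × Int × Int := ("ab c", 0, 5)

def Spec_completeTokenIfIsAlpha (characters : String) (position : Int) (total_characters : Int) (out : String × Int) : Prop := out = completeTokenIfIsAlpha_alt characters position total_characters
instance (characters : String) (position : Int) (total_characters : Int) (out : String × Int) : Decidable (Spec_completeTokenIfIsAlpha characters position total_characters out) := by unfold Spec_completeTokenIfIsAlpha; infer_instance

-- ===== CLAIM (what is proved, stated in full; the proofs are below) =====
def Claim_equal_completeTokenIfIsAlpha : Prop := ∀ (characters : String) (position : Int) (total_characters : Int), Dom_completeTokenIfIsAlpha characters position total_characters → Pre_completeTokenIfIsAlpha characters position total_characters → Spec_completeTokenIfIsAlpha characters position total_characters (completeTokenIfIsAlpha characters position total_characters)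

-- ===== LEMMAS AND PROOFS =====

lemma pvBScan_ge (cs : List Char) (t : Int) : ∀ (f : Nat) (e : Int), e ≤ pvBScan cs t f e := by
  intro f
  induction f with
  | zero => intro e; simp [pvBScan]
  | succ f ih =>
    intro e
    simp only [pvBScan]
    split_ifs with h
    · cases hg : PySem.List.pyGet? cs (e + 1) with
      | none => simp
      | some c =>
        simp only
        split_ifs with ha
        · exact le_trans (by omega) (ih (e + 1))
        · exact le_refl e
    · exact le_refl e

lemma pv_main (cs : List Char) (t : Int) :
    ∀ (m : Nat) (fA fB : Nat) (j : Nat) (token : List Char),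
      cs.length - j ≤ m → cs.length - j ≤ fA → cs.length - j ≤ fB →
      j < cs.length →
      pvAlnum (cs[j]?.getD ' ') = true →
      (j : Int) < t →
      (t ≤ (cs.length : Int) ∨ (cs.drop j).all pvAlnum = false) →
      pvALoop cs t fA token (j : Int) =
        (token ++ (cs.drop (j + 1)).take ((pvBScan cs t fB (j : Int)).toNat - j),
         if pvBScan cs t fB (j : Int) == t - 1 then pvBScan cs t fB (j : Int)
         else pvBScan cs t fB (j : Int) + 1) := by
  intro m
  induction m with
  | zero => intro fA fB j token hm _ _ hj _ _ _; omega
  | succ m ih =>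
    intro fA fB j token hm hfA hfB hj halnum hjt hpre
    obtain ⟨fA', rfl⟩ : ∃ k, fA = k + 1 := ⟨fA - 1, by omega⟩
    obtain ⟨fB', rfl⟩ : ∃ k, fB = k + 1 := ⟨fB - 1, by omega⟩
    have hget : PySem.List.pyGet? cs (j : Int) = some (cs[j]?.getD ' ') := by
      simp [List.getElem?_eq_getElem hj]
    by_cases hjt1 : (j : Int) = t - 1
    · -- break at total-1
      have hb : pvBScan cs t (fB' + 1) (j : Int) = (j : Int) := by
        simp [pvBScan, hjt1]
      rw [hb]
      simp only [pvALoop]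
      rw [hget]
      simp [halnum, hjt1]
    · have hlt : (j : Int) < t - 1 := by omega
      have hb0 : ((j : Int) == t - 1) = false := by simp [hjt1]
      -- next index must be in range under the precondition
      have hj2 : j + 1 < cs.length := by
        by_contra hcon
        have hjn : j + 1 = cs.length := by omega
        have hdrop : cs.drop j = [cs[j]?.getD ' '] := by
          rw [List.drop_eq_getElem_cons hj, List.drop_eq_nil_of_le (by omega)]
          simp [List.getElem?_eq_getElem hj]
        rcases hpre with h | h
        · omega
        · rw [hdrop] at h; simp [halnum] at h
      have hcast : (j : Int) + 1 = ((j + 1 : Nat) : Int) := by push_cast; ring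
      have hget2 : PySem.List.pyGet? cs ((j : Int) + 1) = some (cs[j+1]?.getD ' ') := by
        rw [hcast, PySem.List.pyGet?_natCast]
        simp [List.getElem?_eq_getElem hj2]
      have hdropj : cs.drop j = cs[j]?.getD ' ' :: cs.drop (j + 1) := by
        rw [List.drop_eq_getElem_cons hj]; simp [List.getElem?_eq_getElem hj]
      have hdropj1 : cs.drop (j+1) = cs[j+1]?.getD ' ' :: cs.drop (j + 2) := by
        rw [List.drop_eq_getElem_cons hj2]; simp [List.getElem?_eq_getElem hj2]
      by_cases ha2 : pvAlnum (cs[j+1]?.getD ' ') = true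
      · -- run continues
        have hb : pvBScan cs t (fB' + 1) (j : Int) = pvBScan cs t fB' ((j : Int) + 1) := by
          simp only [pvBScan]
          rw [if_pos hlt, hget2]
          simp [ha2]
        have hih := ih fA' fB' (j + 1) (token ++ [cs[j+1]?.getD ' '])
          (by omega) (by omega) (by omega) hj2 ha2 (by push_cast; omega)
          (by rcases hpre with h | h
              · exact Or.inl h
              · right; rw [hdropj] at h; simpa [halnum] using h)
        have hA : pvALoop cs t (fA' + 1) token (j : Int)
            = pvALoop cs t fA' (token ++ [cs[j+1]?.getD ' ']) ((j : Int) + 1) := by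
          simp only [pvALoop]
          rw [hget]
          simp only [halnum, if_true, hb0, Bool.false_eq_true, if_false]
          rw [hget2]
          simp [ha2]
        rw [hA, hb, hcast, hih]
        have hge : ((j + 1 : Nat) : Int) ≤ pvBScan cs t fB' ((j + 1 : Nat) : Int) :=
          pvBScan_ge cs t fB' _
        set e := pvBScan cs t fB' ((j + 1 : Nat) : Int) with he
        have het : j + 1 ≤ e.toNat := by omega
        have htake : e.toNat - j = (e.toNat - (j + 1)) + 1 := by omega
        rw [hdropj1, htake, List.take_succ_cons, List.append_assoc]
        simp
      · -- run stops: next char not alnum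
        have hb : pvBScan cs t (fB' + 1) (j : Int) = (j : Int) := by
          simp only [pvBScan]
          rw [if_pos hlt, hget2]
          simp [ha2]
        rw [hb]
        simp only [pvALoop]
        rw [hget]
        simp only [halnum, if_true, hb0, Bool.false_eq_true, if_false]
        rw [hget2]
        simp [ha2]

-- ===== VERDICT (by name: the statement is the Claim_ definition above) =====
theorem completeTokenIfIsAlpha_spec : Claim_equal_completeTokenIfIsAlpha := by
  intro characters position t _hdom hpre
  obtain ⟨hin, himp⟩ := hpre
  unfold Spec_completeTokenIfIsAlpha completeTokenIfIsAlpha completeTokenIfIsAlpha_alt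
  set cs := characters.toList with hcs
  obtain ⟨c, hc⟩ : ∃ c, PySem.List.pyGet? cs position = some c := by
    cases hg : PySem.List.pyGet? cs position with
    | none => exact absurd ((PySem.List.pyGet?_eq_none_iff _ _).mp hg) (by simpa using hin)
    | some c => exact ⟨c, rfl⟩
  have hgd : PySem.List.pyGetD cs position ' ' = c := by
    simp [PySem.List.pyGetD, hc]
  simp only [hc]
  by_cases ha : pvAlnum c = true
  · obtain ⟨hpos, hplt, hdisj⟩ := himp (by rw [hgd]; exact ha)
    obtain ⟨j, rfl⟩ : ∃ j : Nat, position = (j : Int) := ⟨position.toNat, by omega⟩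
    have hj : j < cs.length := by
      have := hin.2
      omega
    have hcj : c = cs[j]?.getD ' ' := by
      rw [PySem.List.pyGet?_natCast] at hc
      simp [hc]
    have hmain := pv_main cs t cs.length (2 * cs.length + 2) (2 * cs.length + 2) j [c]
      (by omega) (by omega) (by omega) hj (by rw [← hcj]; exact ha) (by exact_mod_cast hplt)
      hdisj
    simp only [hmain]
    set e := pvBScan cs t (2 * cs.length + 2) (j : Int) with he
    have hge : (j : Int) ≤ e := pvBScan_ge cs t _ _
    have hslice : PySem.List.slice cs (some (j : Int)) (some (e + 1))
        = c :: (cs.drop (j + 1)).take (e.toNat - j) := by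
      rw [PySem.List.slice_toNat cs (by omega) (by omega)]
      have h1 : ((j : Int)).toNat = j := by omega
      have h2 : (e + 1).toNat = (e.toNat - j + 1) + j := by omega
      rw [h1, h2, List.drop_eq_getElem_cons hj]
      have h3 : e.toNat - j + 1 + j - j = e.toNat - j + 1 := by omega
      rw [h3, List.take_succ_cons]
      simp [hcj, List.getElem?_eq_getElem hj]
    simp only [ha, Bool.not_true, Bool.false_eq_true, if_false, hslice]
    rfl
  · obtain ⟨k, hk⟩ : ∃ k, 2 * cs.length + 2 = k + 1 := ⟨2 * cs.length + 1, by omega⟩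
    simp only [hk, pvALoop, hc]
    simp [ha]
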